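-- pv_equiv track=rewrite | github.com/Reprieven/AOIS | Lab3/TableMethod.py | split_rows_with_coordinates
-- ===== SOURCE A (Python) =====
-- def split_rows_with_coordinates(karno):
--     result = []
--
--     for i, row in enumerate(karno):
--         j = 0
--         while j < len(row):
--             if row[j] != 1:
--                 j += 1
--                 continue
--
--             block_size = 1
--             if j + 1 < len(row) and row[j+1] == 1:
--                 block_size = 2
--
--             result.append(([1]*block_size, (i, j)))
--             j += block_size
--
--     return result
-- ===== SOURCE B (Python) =====
-- def split_rows_with_coordinates(karno):
--     result = []
--     for i, row in enumerate(karno):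
--         # phase 1: maximal runs of consecutive 1s in this row, as (start, length)
--         runs = []
--         start = None
--         for j, v in enumerate(row):
--             if v == 1:
--                 if start is None:
--                     start = j
--             elif start is not None:
--                 runs.append((start, j - start))
--                 start = None
--         if start is not None:
--             runs.append((start, len(row) - start))
--         # phase 2: chunk each run into pairs, trailing single block for odd runs
--         for s, length in runs:
--             off = s
--             end = s + length
--             while off < end:
--                 result.append(([1] * min(2, end - off), (i, off)))
--                 off += 2
--     return result
-- ===== Notes on version B (the rewrite author's own statement) =====
-- stated objective: alternative
-- what changed: Replaces A's single fused while-loop (which decides block size 1 or 2 by peeking at row[j+1] while scanning) with a two-phase build: first compute the maximal runs of consecutive 1s per row as (start,length) pairs, then chunk each run into size-2 blocks with a trailing size-1 block for odd runs.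
import Mathlib
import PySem

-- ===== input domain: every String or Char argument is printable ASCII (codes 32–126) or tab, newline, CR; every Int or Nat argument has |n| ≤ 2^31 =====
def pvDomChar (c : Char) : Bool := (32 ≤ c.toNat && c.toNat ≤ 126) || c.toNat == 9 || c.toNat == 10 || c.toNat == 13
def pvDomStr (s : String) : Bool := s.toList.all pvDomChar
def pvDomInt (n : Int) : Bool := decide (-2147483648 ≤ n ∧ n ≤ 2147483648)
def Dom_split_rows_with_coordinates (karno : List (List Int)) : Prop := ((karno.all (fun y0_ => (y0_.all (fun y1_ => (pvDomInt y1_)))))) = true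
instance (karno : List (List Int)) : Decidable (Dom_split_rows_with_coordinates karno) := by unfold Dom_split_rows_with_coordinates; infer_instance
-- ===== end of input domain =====

-- B replaces A's fused while-loop with a two-phase build: per-row runs of consecutive 1s first, then chunking each run into size-≤2 blocks (alternative decomposition, same cost).

-- ===== PORT A =====
-- the inner `while j < len(row)` loop of A, for the row with index i
def loopA (i : Int) (row : List Int) (j : Int) : List (List Int × (Int × Int)) :=
  if _h : j < (row.length : Int) then
    if PySem.List.pyGetD row j 0 ≠ 1 then
      loopA i row (j + 1)
    else
      -- 0 ≤ j < len(row) throughout, so row[j] / row[j+1] are in range: pyGetD is exact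
      let bs : Int := if j + 1 < (row.length : Int) ∧ PySem.List.pyGetD row (j + 1) 0 = 1 then 2 else 1
      (List.replicate bs.toNat 1, (i, j)) :: loopA i row (j + bs)
  else []
termination_by ((row.length : Int) - j).toNat
decreasing_by
  · omega
  · split <;> omega

def split_rows_with_coordinates (karno : List (List Int)) : List (List Int × (Int × Int)) :=
  (PySem.List.enumerate karno 0).foldl (fun acc p => acc ++ loopA p.1 p.2 0) []

-- ===== PORT B =====
-- phase-1 step: fold over enumerate(row), state = (runs so far, start of the open run)
def scanStepB (st : List (Int × Int) × Option Int) (p : Int × Int) : List (Int × Int) × Option Int :=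
  if p.2 = 1 then
    (st.1, match st.2 with | none => some p.1 | some s => some s)
  else
    match st.2 with
    | some s => (st.1 ++ [(s, p.1 - s)], none)
    | none => (st.1, none)

-- phase-2 inner `while off < end` loop: chunk the run [off, fin) into blocks of ≤ 2
def chunkB (i : Int) (off fin : Int) : List (List Int × (Int × Int)) :=
  if off < fin then
    (List.replicate (min 2 (fin - off)).toNat 1, (i, off)) :: chunkB i (off + 2) fin
  else []
termination_by (fin - off).toNat

def rowB (i : Int) (row : List Int) : List (List Int × (Int × Int)) :=
  let st := (PySem.List.enumerate row 0).foldl scanStepB ([], none)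
  let runs := match st.2 with
    | some s => st.1 ++ [(s, (row.length : Int) - s)]
    | none => st.1
  runs.foldl (fun acc p => acc ++ chunkB i p.1 (p.1 + p.2)) []

def split_rows_with_coordinates_alt (karno : List (List Int)) : List (List Int × (Int × Int)) :=
  (PySem.List.enumerate karno 0).foldl (fun acc p => acc ++ rowB p.1 p.2) []

-- ===== PRECONDITION & SPEC =====
def Spec_split_rows_with_coordinates (karno : List (List Int)) (out : List (List Int × (Int × Int))) : Prop := out = split_rows_with_coordinates_alt karno
instance (karno : List (List Int)) (out : List (List Int × (Int × Int))) : Decidable (Spec_split_rows_with_coordinates karno out) := by unfold Spec_split_rows_with_coordinates; infer_instance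

-- ===== CLAIM (what is proved, stated in full; the proofs are below) =====
def Claim_equal_split_rows_with_coordinates : Prop := ∀ (karno : List (List Int)), Dom_split_rows_with_coordinates karno → Spec_split_rows_with_coordinates karno (split_rows_with_coordinates karno)

-- ===== LEMMAS AND PROOFS =====

-- length of the run of consecutive 1s in row starting at index j
def runLen (row : List Int) (j : Int) : Nat :=
  if _h : 0 ≤ j ∧ j < (row.length : Int) ∧ PySem.List.pyGetD row j 0 = 1 then
    runLen row (j + 1) + 1
  else 0
termination_by ((row.length : Int) - j).toNat
decreasing_by omega

-- leading-ones count of a list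
def ones (l : List Int) : Nat := (l.takeWhile (· == 1)).length

-- structural version of B's phase-1 scan
def scanRec (j : Int) (st : Option Int) : List Int → List (Int × Int)
  | [] => (match st with | some s => [(s, j - s)] | none => [])
  | v :: rest =>
    if v = 1 then scanRec (j + 1) (match st with | none => some j | some s => some s) rest
    else match st with
      | some s => (s, j - s) :: scanRec (j + 1) none rest
      | none => scanRec (j + 1) none rest

def chunksOf (i : Int) (rs : List (Int × Int)) : List (List Int × (Int × Int)) :=
  rs.flatMap (fun p => chunkB i p.1 (p.1 + p.2))

def finishB (st : List (Int × Int) × Option Int) (n : Int) : List (Int × Int) :=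
  match st.2 with
  | some s => st.1 ++ [(s, n - s)]
  | none => st.1

theorem ones_cons_one (rest : List Int) : ones (1 :: rest) = ones rest + 1 := by
  simp [ones]

theorem ones_cons_ne (v : Int) (rest : List Int) (hv : v ≠ 1) : ones (v :: rest) = 0 := by
  simp [ones, hv]

theorem scanRec_some (rest : List Int) : ∀ (j s : Int),
    scanRec j (some s) rest
      = (s, (j - s) + (ones rest : Int)) :: scanRec (j + (ones rest : Int)) none (rest.drop (ones rest)) := by
  induction rest with
  | nil => intro j s; simp [scanRec, ones]
  | cons v rest ih =>
    intro j s
    by_cases hv : v = 1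
    · subst hv
      rw [ones_cons_one]
      simp only [scanRec, ih]
      refine congrArg₂ List.cons ?_ ?_
      · refine congrArg₂ Prod.mk rfl ?_; push_cast; ring
      · rw [List.drop_succ_cons]
        refine congrArg₂ (fun a b => scanRec a none b) ?_ rfl
        push_cast; ring
    · rw [ones_cons_ne v rest hv]
      simp [scanRec, hv]

theorem foldl_scanStepB (rest : List Int) : ∀ (j : Int) (runs : List (Int × Int)) (st : Option Int),
    finishB ((PySem.List.enumerate rest j).foldl scanStepB (runs, st)) (j + rest.length)
      = runs ++ scanRec j st rest := by
  induction rest with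
  | nil => intro j runs st; cases st <;> simp [finishB, scanRec, PySem.List.enumerate_nil]
  | cons v rest ih =>
    intro j runs st
    rw [PySem.List.enumerate_cons, List.foldl_cons,
        show j + ((v :: rest).length : Int) = (j + 1) + (rest.length : Int) by
          simp [List.length_cons]; ring]
    by_cases hv : v = 1
    · cases st <;> simp only [scanStepB, scanRec, if_pos hv] <;> rw [ih]
    · cases st with
      | none =>
        simp only [scanStepB, if_neg hv, scanRec]
        rw [ih]
      | some s =>
        simp only [scanStepB, if_neg hv, scanRec]
        rw [ih, List.append_assoc]
        rfl

theorem getD_drop (row : List Int) (j : Int) (hj : 0 ≤ j) :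
    PySem.List.pyGetD row j 0 = (row.drop j.toNat).headD 0 := by
  rw [show j = ((j.toNat : Nat) : Int) by omega, PySem.List.pyGetD_natCast]
  simp [List.getD, List.headD_eq_head?_getD, List.head?_drop]
  rw [show max j 0 = j from by omega]

theorem runLen_pos (row : List Int) (j : Int) (h : runLen row j ≠ 0) :
    0 ≤ j ∧ j < (row.length : Int) ∧ PySem.List.pyGetD row j 0 = 1 := by
  by_contra hc
  rw [runLen, dif_neg hc] at h
  exact h rfl

theorem runLen_eq_ones (row : List Int) : ∀ (n : Nat) (j : Int), 0 ≤ j →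
    ((row.length : Int) - j).toNat ≤ n → runLen row j = ones (row.drop j.toNat) := by
  intro n
  induction n with
  | zero =>
    intro j hj hn
    have hlen : (row.length : Int) ≤ j := by omega
    rw [runLen, dif_neg (by omega), List.drop_eq_nil_of_le (by omega)]
    rfl
  | succ n ih =>
    intro j hj hn
    by_cases h : 0 ≤ j ∧ j < (row.length : Int) ∧ PySem.List.pyGetD row j 0 = 1
    · have hlt : j.toNat < row.length := by omega
      have hd : row.drop j.toNat = row[j.toNat] :: row.drop (j.toNat + 1) :=
        List.drop_eq_getElem_cons hlt
      have h1 : row[j.toNat] = 1 := by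
        have hg := getD_drop row j hj
        rw [hd] at hg
        simp at hg
        rw [List.getElem?_eq_getElem hlt] at hg
        simp at hg
        rw [← hg]; exact h.2.2
      rw [runLen, dif_pos h, hd, h1, ones_cons_one,
          ih (j + 1) (by omega) (by omega),
          show (j + 1).toNat = j.toNat + 1 by omega]
    · rw [runLen, dif_neg h]
      rcases (by omega : (row.length : Int) ≤ j ∨ j < (row.length : Int)) with hge | hlt
      · rw [List.drop_eq_nil_of_le (by omega)]; rfl
      · have hne : PySem.List.pyGetD row j 0 ≠ 1 := by tauto
        have hd : row.drop j.toNat = row[j.toNat] :: row.drop (j.toNat + 1) :=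
          List.drop_eq_getElem_cons (by omega)
        have h1 : row[j.toNat] ≠ 1 := by
          have hg := getD_drop row j hj
          rw [hd] at hg
          simp at hg
          rw [List.getElem?_eq_getElem (by omega : j.toNat < row.length)] at hg
          simp at hg
          rw [← hg]; exact hne
        rw [hd, ones_cons_ne _ _ h1]

theorem loopA_run (i : Int) (row : List Int) : ∀ (n : Nat) (j : Int), 0 ≤ j →
    ((row.length : Int) - j).toNat ≤ n →
    j < (row.length : Int) → PySem.List.pyGetD row j 0 = 1 →
    loopA i row j = chunkB i j (j + runLen row j) ++ loopA i row (j + runLen row j) := by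
  intro n
  induction n with
  | zero => intro j hj hn hlt h1; omega
  | succ n ih =>
    intro j hj hn hlt h1
    have hr1 : runLen row j = runLen row (j + 1) + 1 := by
      rw [runLen, dif_pos ⟨hj, hlt, h1⟩]
    rw [loopA, dif_pos hlt, if_neg (by simpa using h1)]
    by_cases hp : j + 1 < (row.length : Int) ∧ PySem.List.pyGetD row (j + 1) 0 = 1
    · -- block of size 2
      have hr2 : runLen row (j + 1) = runLen row (j + 2) + 1 := by
        rw [runLen, dif_pos ⟨by omega, hp.1, hp.2⟩, show j + 1 + 1 = j + 2 by ring]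
      simp only [if_pos hp]
      have hmin : (min 2 (j + (runLen row j : Int) - j)).toNat = 2 := by omega
      rw [show chunkB i j (j + (runLen row j : Int))
            = (List.replicate 2 1, (i, j)) :: chunkB i (j + 2) (j + (runLen row j : Int)) by
          rw [chunkB, if_pos (by omega), hmin]]
      refine congrArg₂ List.cons rfl ?_
      by_cases hz : runLen row (j + 2) = 0
      · rw [show j + (runLen row j : Int) = j + 2 by omega, chunkB, if_neg (by omega)]
        simp
      · have hc := runLen_pos row (j + 2) hz
        rw [ih (j + 2) (by omega) (by omega) hc.2.1 hc.2.2,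
            show j + 2 + (runLen row (j + 2) : Int) = j + (runLen row j : Int) by omega]
        rfl
    · -- block of size 1
      have hz : runLen row (j + 1) = 0 := by
        rw [runLen, dif_neg (by tauto)]
      have hr : runLen row j = 1 := by omega
      simp only [if_neg hp, hr]
      rw [show chunkB i j (j + (1 : Nat))
            = (List.replicate 1 1, (i, j)) :: chunkB i (j + 2) (j + (1 : Nat)) by
          rw [chunkB, if_pos (by omega)]
          refine congrArg₂ List.cons ?_ rfl
          refine congrArg₂ Prod.mk ?_ rfl
          refine congrArg₂ List.replicate (by omega) rfl,
        chunkB, if_neg (by omega)]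
      simp

theorem loopA_eq_chunks (i : Int) (row : List Int) : ∀ (n : Nat) (j : Int), 0 ≤ j →
    ((row.length : Int) - j).toNat ≤ n →
    loopA i row j = chunksOf i (scanRec j none (row.drop j.toNat)) := by
  intro n
  induction n with
  | zero =>
    intro j hj hn
    rw [loopA, dif_neg (by omega), List.drop_eq_nil_of_le (by omega)]
    rfl
  | succ n ih =>
    intro j hj hn
    rcases (by omega : (row.length : Int) ≤ j ∨ j < (row.length : Int)) with hge | hlt
    · rw [loopA, dif_neg (by omega), List.drop_eq_nil_of_le (by omega)]
      rfl
    · have hd : row.drop j.toNat = row[j.toNat] :: row.drop (j.toNat + 1) :=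
        List.drop_eq_getElem_cons (by omega)
      have hget : PySem.List.pyGetD row j 0 = row[j.toNat] := by
        rw [getD_drop row j hj, hd]; rfl
      by_cases hv : row[j.toNat] = 1
      · -- a run starts at j
        have h1 : PySem.List.pyGetD row j 0 = 1 := by rw [hget, hv]
        have hones : runLen row j = ones (row.drop j.toNat) := by
          exact runLen_eq_ones row (n + 1) j hj hn
        have hro : runLen row j = ones (row.drop (j.toNat + 1)) + 1 := by
          rw [hones, hd, hv, ones_cons_one]
        set c : Nat := ones (row.drop (j.toNat + 1)) with hc
        rw [loopA_run i row (n + 1) j hj hn hlt h1, hd, hv]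
        rw [show scanRec j none (1 :: row.drop (j.toNat + 1))
              = scanRec (j + 1) (some j) (row.drop (j.toNat + 1)) by
            simp [scanRec]]
        rw [scanRec_some]
        rw [show chunksOf i ((j, j + 1 - j + (c : Int))
              :: scanRec (j + 1 + (c : Int)) none ((row.drop (j.toNat + 1)).drop c))
            = chunkB i j (j + (j + 1 - j + (c : Int)))
              ++ chunksOf i (scanRec (j + 1 + (c : Int)) none ((row.drop (j.toNat + 1)).drop c)) from rfl]
        refine congrArg₂ (· ++ ·) ?_ ?_
      -- chunk part: bounds agree
        · refine congrArg (chunkB i j) ?_; omega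
        · rw [List.drop_drop,
              show j.toNat + 1 + c = (j + (runLen row j : Int)).toNat by omega,
              ih (j + (runLen row j : Int)) (by omega) (by omega),
              show j + 1 + (c : Int) = j + (runLen row j : Int) by omega]
      · -- no run at j: skip
        have h1 : PySem.List.pyGetD row j 0 ≠ 1 := by rw [hget]; exact hv
        rw [loopA, dif_pos hlt, if_pos h1, hd]
        rw [show scanRec j none (row[j.toNat] :: row.drop (j.toNat + 1))
              = scanRec (j + 1) none (row.drop (j.toNat + 1)) by
            simp [scanRec, hv]]
        rw [ih (j + 1) (by omega) (by omega),
            show (j + 1).toNat = j.toNat + 1 by omega]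

theorem rowB_eq (i : Int) (row : List Int) : rowB i row = chunksOf i (scanRec 0 none row) := by
  have h := foldl_scanStepB row 0 [] none
  simp only [zero_add] at h
  rw [rowB, PySem.List.foldl_append_eq_flatMap]
  rw [show (match ((PySem.List.enumerate row 0).foldl scanStepB ([], none)).2 with
      | some s => ((PySem.List.enumerate row 0).foldl scanStepB ([], none)).1 ++ [(s, (row.length : Int) - s)]
      | none => ((PySem.List.enumerate row 0).foldl scanStepB ([], none)).1)
      = finishB ((PySem.List.enumerate row 0).foldl scanStepB ([], none)) (row.length : Int) from rfl]
  rw [h]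
  simp [chunksOf]

theorem row_eq (i : Int) (row : List Int) : loopA i row 0 = rowB i row := by
  rw [rowB_eq]
  have := loopA_eq_chunks i row row.length 0 le_rfl (by omega)
  simpa using this

-- ===== VERDICT (by name: the statement is the Claim_ definition above) =====
theorem split_rows_with_coordinates_spec : Claim_equal_split_rows_with_coordinates := by
  intro karno _
  unfold Spec_split_rows_with_coordinates split_rows_with_coordinates split_rows_with_coordinates_alt
  congr 1
  funext acc p
  rw [row_eq]
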